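-- pv_equiv track=rewrite | github.com/cyl0424/algorithm_study | 프로그래머스/2/340212. ［PCCP 기출문제］ 2번 ／ 퍼즐 게임 챌린지/［PCCP 기출문제］ 2번 ／ 퍼즐 게임 챌린지.py | solution
-- ===== SOURCE A (Python) =====
-- def solution(diffs, times, limit):
--     def can_solve_with_level(level):
--         total_time = 0
--
--         for i in range(len(diffs)):
--             diff = diffs[i]
--             time_cur = times[i]
--             time_prev = times[i-1] if i > 0 else 0
--
--             if diff <= level:
--                 solve_time = time_cur
--             else:
--                 solve_time = (diff - level) * (time_cur + time_prev) + time_cur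
--
--             total_time += solve_time
--
--             if total_time > limit:
--                 return False
--
--         return total_time <= limit
--
--
--     left, right = 1, max(diffs)
--     answer = right
--
--     while left <= right:
--         mid = (left + right) // 2
--
--         if can_solve_with_level(mid):
--             answer = mid
--             right = mid - 1
--         else:
--             left = mid + 1
--
--     return answer
-- ===== SOURCE B (Python) =====
-- def solution(diffs, times, limit):
--     def can_solve_with_level(level):
--         total_time = 0
--
--         for i in range(len(diffs)):
--             diff = diffs[i]
--             time_cur = times[i]
--             time_prev = times[i-1] if i > 0 else 0
--
--             if diff <= level:
--                 solve_time = time_cur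
--             else:
--                 solve_time = (diff - level) * (time_cur + time_prev) + time_cur
--
--             total_time += solve_time
--
--             if total_time > limit:
--                 return False
--
--         return total_time <= limit
--
--     hi = max(diffs)
--     # Segment scan instead of a search over individual levels: the running totals are
--     # affine in the level between consecutive distinct difficulties, so scan the sorted
--     # distinct difficulties >= 1 for the first feasible one, then solve the per-prefix
--     # linear inequalities in closed form (ceiling division) inside that segment.
--     cands = sorted({d for d in diffs if d >= 1})
--     prev = 0
--     for c in cands:
--         if can_solve_with_level(c):
--             # answer lies in (prev, c]; on [prev+1, c-1] the prefix totals are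
--             # T_k + A_k - level * W_k with A_k, W_k summed over puzzles of diff >= c
--             req = prev + 1
--             T = A = W = 0
--             ok = True
--             for i in range(len(diffs)):
--                 d = diffs[i]
--                 w = times[i] + (times[i-1] if i > 0 else 0)
--                 T += times[i]
--                 if d >= c:
--                     A += d * w
--                     W += w
--                 need = T + A - limit
--                 if need > 0:
--                     if W <= 0:
--                         ok = False
--                         break
--                     req = max(req, -(-need // W))
--             if ok and req <= c - 1:
--                 return req
--             return c
--         prev = c
--     return hi
-- ===== Notes on version B (the rewrite author's own statement) =====
-- stated objective: alternative
-- what changed: The feasibility helper is kept verbatim, but A's binary-search loop (left/right/mid with a best-answer variable) is replaced by a segment scan: the running prefix totals are affine in the level between consecutive distinct difficulties, so B scans the sorted distinct difficulties >= 1 for the first feasible one and then solves the per-prefix linear inequalities in closed form (ceiling division) inside that segment; feasibility is monotone in the level under Pre_, so this yields the binary search's answer. …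
-- outside the precondition, e.g. on solution([], [], 10): A raises ValueError, B raises ValueError; on solution([1, 2], [3], 10): A raises IndexError, B raises IndexError; on solution([4], [-6], -18): A returns 1, B returns 4
import Mathlib
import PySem

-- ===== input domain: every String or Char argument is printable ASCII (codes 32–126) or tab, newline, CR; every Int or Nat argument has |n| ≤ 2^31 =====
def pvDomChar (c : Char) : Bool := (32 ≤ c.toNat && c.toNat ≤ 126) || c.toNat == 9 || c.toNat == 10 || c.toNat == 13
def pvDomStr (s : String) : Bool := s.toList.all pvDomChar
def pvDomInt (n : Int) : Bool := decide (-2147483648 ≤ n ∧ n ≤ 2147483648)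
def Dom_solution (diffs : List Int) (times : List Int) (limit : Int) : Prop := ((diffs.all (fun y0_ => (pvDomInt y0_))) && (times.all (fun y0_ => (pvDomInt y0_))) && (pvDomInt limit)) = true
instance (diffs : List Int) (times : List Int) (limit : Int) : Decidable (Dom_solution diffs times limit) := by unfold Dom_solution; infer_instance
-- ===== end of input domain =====

-- B keeps A's feasibility helper verbatim but replaces the binary search over levels by a
-- segment scan: the running totals are affine in the level between consecutive distinct
-- difficulties, so B scans the sorted distinct difficulties for the first feasible one and
-- then solves the per-prefix linear inequalities in closed form (ceiling division) inside
-- that segment; equivalence holds because feasibility is monotone in the level under Pre_.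

-- ===== PORT A =====
-- can_solve_with_level: identical inner helper of BOTH Pythons (A and Source B contain it verbatim),
-- ported once and used by both ports. pyGet? = none is Python's IndexError (excluded by
-- Pre_solution: diffs.length ≤ times.length); the .getD 0 fallback is never reached inside Pre_.
def canLoop (diffs times : List Int) (limit level : Int) : List Int → Int → Bool
  | [], total_time => decide (total_time ≤ limit)
  | i :: rest, total_time =>
      let diff := (PySem.List.pyGet? diffs i).getD 0
      let time_cur := (PySem.List.pyGet? times i).getD 0
      let time_prev := if 0 < i then (PySem.List.pyGet? times (i - 1)).getD 0 else 0
      let solve_time := if diff ≤ level then time_cur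
                        else (diff - level) * (time_cur + time_prev) + time_cur
      let total' := total_time + solve_time
      if limit < total' then false else canLoop diffs times limit level rest total'

def canSolveWithLevel (diffs times : List Int) (limit level : Int) : Bool :=
  canLoop diffs times limit level (PySem.List.pyRange 0 (diffs.length : Int) 1) 0

-- the while-loop of A (binary search); terminates because the interval shrinks
def bsLoop (diffs times : List Int) (limit left right answer : Int) : Int :=
  if h : left ≤ right then
    -- mid = (left + right) // 2, inlined
    if canSolveWithLevel diffs times limit (PySem.Int.floordiv (left + right) 2) then
      bsLoop diffs times limit left (PySem.Int.floordiv (left + right) 2 - 1)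
        (PySem.Int.floordiv (left + right) 2)
    else
      bsLoop diffs times limit (PySem.Int.floordiv (left + right) 2 + 1) right answer
  else answer
  termination_by (right + 1 - left).toNat
  decreasing_by
  · have hb := PySem.Int.floordiv_two_mid_bounds h; omega
  · have hb := PySem.Int.floordiv_two_mid_bounds h; omega

-- max? = none is Python's ValueError on max([]) (excluded by Pre_solution: diffs ≠ [])
def solution (diffs : List Int) (times : List Int) (limit : Int) : Int :=
  let right := (PySem.List.max? diffs (fun x => x)).getD 0
  bsLoop diffs times limit 1 right right

-- ===== PORT B =====
-- Source B's inner for-loop over range(len(diffs)): accumulate T (prefix time sum), A, W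
-- (weighted sums over puzzles of diff ≥ c) and the closed-form level requirement req
-- (ceiling division -(-need // W)); first component false = the loop hit `break` (ok = False)
def segLoop (diffs times : List Int) (limit c : Int) : List Int → Int → Int → Int → Int → Bool × Int
  | [], _T, _A, _W, req => (true, req)
  | i :: rest, T, A, W, req =>
      let d := (PySem.List.pyGet? diffs i).getD 0
      let w := (PySem.List.pyGet? times i).getD 0 +
        (if 0 < i then (PySem.List.pyGet? times (i - 1)).getD 0 else 0)
      let T' := T + (PySem.List.pyGet? times i).getD 0
      let A' := if c ≤ d then A + d * w else A
      let W' := if c ≤ d then W + w else W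
      let need := T' + A' - limit
      if 0 < need then
        if W' ≤ 0 then (false, req)
        else segLoop diffs times limit c rest T' A' W' (max req (-(PySem.Int.floordiv (-need) W')))
      else segLoop diffs times limit c rest T' A' W' req

-- Source B's outer for-loop over the sorted distinct difficulties
def candLoop (diffs times : List Int) (limit hi : Int) : List Int → Int → Int
  | [], _prev => hi
  | c :: rest, prev =>
      if canSolveWithLevel diffs times limit c then
        let r := segLoop diffs times limit c (PySem.List.pyRange 0 (diffs.length : Int) 1) 0 0 0 (prev + 1)
        if r.1 ∧ r.2 ≤ c - 1 then r.2 else c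
      else candLoop diffs times limit hi rest c

def solution_alt (diffs : List Int) (times : List Int) (limit : Int) : Int :=
  let hi := (PySem.List.max? diffs (fun x => x)).getD 0
  -- cands = sorted({d for d in diffs if d >= 1})
  let cands := PySem.List.sorted (PySem.Set.ofList (diffs.filter (fun d => decide (1 ≤ d)))) (fun x => x) false
  candLoop diffs times limit hi cands 0

-- ===== PRECONDITION & SPEC =====
-- Pre_ excludes: empty diffs (A raises ValueError on max) and times shorter than diffs
-- (A raises IndexError); it also excludes inputs outside the puzzle problem's natural
-- domain where a puzzle with diff > 1 has a negative time window (time_cur + time_prev < 0)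
-- — there A's binary search relies on a monotonicity of feasibility that fails and
-- returns an accidental value (see claim cites).
def Pre_solution (diffs : List Int) (times : List Int) (limit : Int) : Prop :=
  diffs ≠ [] ∧ diffs.length ≤ times.length ∧
    ∀ i ∈ PySem.List.pyRange 0 (diffs.length : Int) 1,
      1 < (PySem.List.pyGet? diffs i).getD 0 →
      0 ≤ (PySem.List.pyGet? times i).getD 0 +
          (if 0 < i then (PySem.List.pyGet? times (i - 1)).getD 0 else 0)
instance (diffs : List Int) (times : List Int) (limit : Int) : Decidable (Pre_solution diffs times limit) := by unfold Pre_solution; infer_instance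

def pvWitness_solution : List Int × List Int × Int := ([3, 1, 2], [2, 3, 1], 30)

def Spec_solution (diffs : List Int) (times : List Int) (limit : Int) (out : Int) : Prop := out = solution_alt diffs times limit
instance (diffs : List Int) (times : List Int) (limit : Int) (out : Int) : Decidable (Spec_solution diffs times limit out) := by unfold Spec_solution; infer_instance

-- ===== CLAIM (what is proved, stated in full; the proofs are below) =====
def Claim_equal_solution : Prop := ∀ (diffs : List Int) (times : List Int) (limit : Int), Dom_solution diffs times limit → Pre_solution diffs times limit → Spec_solution diffs times limit (solution diffs times limit)

-- ===== LEMMAS AND PROOFS =====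

-- feasibility is monotone in the level (for levels ≥ 1, under Pre_'s nonnegative time
-- windows): raising the level only shrinks every solve_time, hence every prefix total
lemma canLoop_mono (diffs times : List Int) (limit l1 l2 : Int)
    (hl1 : 1 ≤ l1) (hl : l1 ≤ l2) :
    ∀ idxs, (∀ i ∈ idxs, 1 < (PySem.List.pyGet? diffs i).getD 0 →
        0 ≤ (PySem.List.pyGet? times i).getD 0 +
            (if 0 < i then (PySem.List.pyGet? times (i - 1)).getD 0 else 0)) →
      ∀ tot1 tot2, tot2 ≤ tot1 →
      canLoop diffs times limit l1 idxs tot1 = true →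
      canLoop diffs times limit l2 idxs tot2 = true := by
  intro idxs
  induction idxs with
  | nil => intro _ tot1 tot2 h12 h1; simp [canLoop] at h1 ⊢; omega
  | cons i rest ih =>
      intro hw tot1 tot2 h12 h1
      simp only [canLoop] at h1 ⊢
      set diff := (PySem.List.pyGet? diffs i).getD 0 with hd
      set tc := (PySem.List.pyGet? times i).getD 0 with htc
      set tp := (if 0 < i then (PySem.List.pyGet? times (i - 1)).getD 0 else 0) with htp
      have hs : 1 < diff → 0 ≤ tc + tp := hw i (List.mem_cons_self)
      have hsolve : (if diff ≤ l2 then tc else (diff - l2) * (tc + tp) + tc)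
          ≤ (if diff ≤ l1 then tc else (diff - l1) * (tc + tp) + tc) := by
        split_ifs with h2 h1' h1'
        · exact le_refl _
        · have := hs (by omega); nlinarith
        · omega
        · have := hs (by omega); nlinarith
      by_cases hcmp : limit < tot1 + (if diff ≤ l1 then tc else (diff - l1) * (tc + tp) + tc)
      · rw [if_pos hcmp] at h1; exact absurd h1 (by simp)
      · rw [if_neg hcmp] at h1
        rw [if_neg (by omega : ¬ limit < tot2 + (if diff ≤ l2 then tc else (diff - l2) * (tc + tp) + tc))]
        exact ih (fun j hj => hw j (List.mem_cons_of_mem i hj)) _ _ (by omega) h1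

lemma canSolve_mono (diffs times : List Int) (limit : Int)
    (hw : ∀ i ∈ PySem.List.pyRange 0 (diffs.length : Int) 1,
        1 < (PySem.List.pyGet? diffs i).getD 0 →
        0 ≤ (PySem.List.pyGet? times i).getD 0 +
            (if 0 < i then (PySem.List.pyGet? times (i - 1)).getD 0 else 0))
    {l1 l2 : Int} (hl1 : 1 ≤ l1) (hl : l1 ≤ l2)
    (h : canSolveWithLevel diffs times limit l1 = true) :
    canSolveWithLevel diffs times limit l2 = true :=
  canLoop_mono diffs times limit l1 l2 hl1 hl _ hw 0 0 le_rfl h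

-- the ceiling -(−need // W) is tight: W*X − W < need ≤ W*X
lemma ceil_bounds (need W : Int) (hW : 0 < W) :
    need ≤ W * (-(PySem.Int.floordiv (-need) W)) ∧
      W * (-(PySem.Int.floordiv (-need) W)) - W < need := by
  rw [PySem.Int.floordiv_eq_ediv_of_pos hW]
  have hmod := Int.emod_nonneg (-need) (by omega : W ≠ 0)
  have hmod2 := Int.emod_lt_of_pos (-need) hW
  have hdm := Int.mul_ediv_add_emod (-need) W
  constructor <;> nlinarith [hdm, hmod, hmod2]

-- segLoop only ever raises its req accumulator
lemma segLoop_req_le (diffs times : List Int) (limit c : Int) :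
    ∀ idxs (T A W req : Int), req ≤ (segLoop diffs times limit c idxs T A W req).2 := by
  intro idxs
  induction idxs with
  | nil => intro T A W req; simp [segLoop]
  | cons i rest ih =>
      intro T A W req
      simp only [segLoop]
      set d := (PySem.List.pyGet? diffs i).getD 0 with hd
      set tc := (PySem.List.pyGet? times i).getD 0 with htc
      set tp := (if 0 < i then (PySem.List.pyGet? times (i - 1)).getD 0 else 0) with htp
      split
      all_goals
        split
        · split
          · simp
          · exact le_trans (le_max_left _ _) (ih _ _ _ _)
        · exact ih _ _ _ _

-- THE BRIDGE: inside a segment (every index sees `level < diff ↔ c ≤ diff`, contributing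
-- windows nonnegative), A's feasibility loop at level l succeeds iff B's closed-form
-- accumulator loop finishes without break and its final requirement is ≤ l
lemma seg_main (diffs times : List Int) (limit c l : Int) (hl : 1 ≤ l) :
    ∀ idxs (T A W req : Int),
      (∀ i ∈ idxs, (l < (PySem.List.pyGet? diffs i).getD 0 ↔ c ≤ (PySem.List.pyGet? diffs i).getD 0)) →
      (∀ i ∈ idxs, c ≤ (PySem.List.pyGet? diffs i).getD 0 →
          0 ≤ (PySem.List.pyGet? times i).getD 0 +
              (if 0 < i then (PySem.List.pyGet? times (i - 1)).getD 0 else 0)) →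
      0 ≤ W → req ≤ l →
      (idxs = [] → T + A - l * W ≤ limit) →
      (canLoop diffs times limit l idxs (T + A - l * W) = true ↔
        ((segLoop diffs times limit c idxs T A W req).1 = true ∧
          (segLoop diffs times limit c idxs T A W req).2 ≤ l)) := by
  intro idxs
  induction idxs with
  | nil =>
      intro T A W req _ _ _ hreq hnil
      simp only [canLoop, segLoop, decide_eq_true_eq]
      constructor
      · intro _; exact ⟨trivial, hreq⟩
      · intro _; linarith [hnil rfl]
  | cons i rest ih =>
      intro T A W req hseg hwin hW hreq hnil
      simp only [canLoop, segLoop]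
      set d := (PySem.List.pyGet? diffs i).getD 0 with hd
      set tc := (PySem.List.pyGet? times i).getD 0 with htc
      set tp := (if 0 < i then (PySem.List.pyGet? times (i - 1)).getD 0 else 0) with htp
      have hiff : l < d ↔ c ≤ d := hseg i List.mem_cons_self
      have hwini : c ≤ d → 0 ≤ tc + tp := hwin i List.mem_cons_self
      set T' := T + tc with hT'
      set A' := (if c ≤ d then A + d * (tc + tp) else A) with hA'
      set W' := (if c ≤ d then W + (tc + tp) else W) with hW'
      have hW'0 : 0 ≤ W' := by
        rw [hW']; split_ifs with h
        · have := hwini h; omega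
        · exact hW
      have htot : T + A - l * W + (if d ≤ l then tc else (d - l) * (tc + tp) + tc)
          = T' + A' - l * W' := by
        by_cases h : c ≤ d
        · have hld : l < d := hiff.mpr h
          rw [hA', hW', if_pos h, if_pos h, if_neg (by omega : ¬ d ≤ l)]
          ring
        · have hld : d ≤ l := by by_contra hc; exact h (hiff.mp (by omega))
          rw [hA', hW', if_neg h, if_neg h, if_pos hld]
          ring
      set need := T' + A' - limit with hneed
      by_cases hover : limit < T' + A' - l * W'
      · -- this prefix already exceeds: A's loop fails; B's req jumps above l (or ok = false)
        rw [htot, if_pos hover]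
        have hneedpos : l * W' < need := by omega
        have hneed0 : 0 < need := by nlinarith
        rw [if_pos hneed0]
        by_cases hWz : W' ≤ 0
        · rw [if_pos hWz]; simp
        · rw [if_neg hWz]
          have hWpos : 0 < W' := by omega
          obtain ⟨hc1, hc2⟩ := ceil_bounds need W' hWpos
          set X := -(PySem.Int.floordiv (-need) W') with hX
          have hlX : l < X := by nlinarith
          constructor
          · intro h; exact absurd h (by simp)
          · rintro ⟨-, h2⟩
            have := segLoop_req_le diffs times limit c rest T' A' W' (max req X)
            have : max req X ≤ l := le_trans this h2
            omega
      · rw [htot, if_neg hover]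
        by_cases hneedpos : 0 < need
        · have hWpos : 0 < W' := by
            by_contra hWz
            have : l * W' ≤ 0 := by nlinarith
            omega
          rw [if_pos hneedpos, if_neg (by omega : ¬ W' ≤ 0)]
          obtain ⟨hc1, hc2⟩ := ceil_bounds need W' hWpos
          set X := -(PySem.Int.floordiv (-need) W') with hX
          have hXl : X ≤ l := by nlinarith
          exact ih T' A' W' (max req X)
            (fun j hj => hseg j (List.mem_cons_of_mem i hj))
            (fun j hj => hwin j (List.mem_cons_of_mem i hj))
            hW'0 (by omega) (fun _ => by omega)
        · rw [if_neg hneedpos]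
          exact ih T' A' W' req
            (fun j hj => hseg j (List.mem_cons_of_mem i hj))
            (fun j hj => hwin j (List.mem_cons_of_mem i hj))
            hW'0 hreq (fun _ => by omega)

-- first-hit characterisation of find? on an integer range
lemma find?_pyRange_eq_some (p : Int → Bool) (lo b r : Int) (hlo : lo ≤ r) (hrb : r < b)
    (hf : ∀ l, lo ≤ l → l < r → p l = false) (hp : p r = true) :
    (PySem.List.pyRange lo b 1).find? p = some r := by
  rw [PySem.List.pyRange_one_append lo r b hlo (by omega), List.find?_append]
  have hnone : (PySem.List.pyRange lo r 1).find? p = none := by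
    rw [List.find?_eq_none]
    intro l hl
    have := (PySem.List.mem_pyRange_one).mp hl
    simp [hf l this.1 this.2]
  rw [hnone, PySem.List.pyRange_one_cons (by omega : r < b), List.find?_cons_of_pos (by simpa using hp)]
  simp

lemma find?_pyRange_eq_none (p : Int → Bool) (lo b : Int)
    (hf : ∀ l, lo ≤ l → l < b → p l = false) :
    (PySem.List.pyRange lo b 1).find? p = none := by
  rw [List.find?_eq_none]
  intro l hl
  have := (PySem.List.mem_pyRange_one).mp hl
  simp [hf l this.1 this.2]

-- the binary search computes the first feasible level in [left, right], else `answer`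
lemma bsLoop_eq_find (diffs times : List Int) (limit : Int)
    (hw : ∀ i ∈ PySem.List.pyRange 0 (diffs.length : Int) 1,
        1 < (PySem.List.pyGet? diffs i).getD 0 →
        0 ≤ (PySem.List.pyGet? times i).getD 0 +
            (if 0 < i then (PySem.List.pyGet? times (i - 1)).getD 0 else 0)) :
    ∀ n left right answer, 1 ≤ left → (right + 1 - left).toNat = n →
      bsLoop diffs times limit left right answer =
        ((PySem.List.pyRange left (right + 1) 1).find?
          (fun k => canSolveWithLevel diffs times limit k)).getD answer := by
  intro n
  induction n using Nat.strong_induction_on with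
  | _ n ih =>
    intro left right answer hleft hn
    rw [bsLoop]
    split
    · rename_i h
      have hb := PySem.Int.floordiv_two_mid_bounds h
      set mid := PySem.Int.floordiv (left + right) 2 with hm
      obtain ⟨hb1, hb2⟩ := hb
      have hsplit : PySem.List.pyRange left (right + 1) 1 =
          PySem.List.pyRange left mid 1 ++ PySem.List.pyRange mid (right + 1) 1 :=
        PySem.List.pyRange_one_append _ _ _ (by omega) (by omega)
      have hcons : PySem.List.pyRange mid (right + 1) 1 =
          mid :: PySem.List.pyRange (mid + 1) (right + 1) 1 :=
        PySem.List.pyRange_one_cons (by omega)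
      by_cases hcan : canSolveWithLevel diffs times limit mid = true
      · rw [if_pos hcan]
        rw [ih (mid - 1 + 1 - left).toNat (by omega) left (mid - 1) mid hleft rfl]
        have hm1 : mid - 1 + 1 = mid := by omega
        rw [hm1, hsplit, List.find?_append, hcons]
        rw [List.find?_cons_of_pos (by simpa using hcan)]
        cases (PySem.List.pyRange left mid 1).find? (fun k => canSolveWithLevel diffs times limit k) <;> simp
      · rw [if_neg hcan]
        rw [ih (right + 1 - (mid + 1)).toNat (by omega) (mid + 1) right answer (by omega) (by omega)]
        have hnone : (PySem.List.pyRange left (mid + 1) 1).find?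
            (fun k => canSolveWithLevel diffs times limit k) = none := by
          rw [List.find?_eq_none]
          intro k hk
          have hk' := (PySem.List.mem_pyRange_one).mp hk
          simp only [Bool.not_eq_true]
          cases hck : canSolveWithLevel diffs times limit k with
          | false => rfl
          | true =>
              exact absurd (canSolve_mono diffs times limit hw (l1 := k) (l2 := mid) (by omega) (by omega) hck)
                (by simpa using hcan)
        have hsplit2 : PySem.List.pyRange left (right + 1) 1 =
            PySem.List.pyRange left (mid + 1) 1 ++ PySem.List.pyRange (mid + 1) (right + 1) 1 :=
          PySem.List.pyRange_one_append _ _ _ (by omega) (by omega)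
        rw [hsplit2, List.find?_append, hnone]
        simp
    · rename_i h
      rw [PySem.List.pyRange_one_eq_nil (by omega)]
      simp

-- an index of the loop range reads an element of diffs
lemma dval_mem (diffs : List Int) (i : Int)
    (hi : i ∈ PySem.List.pyRange 0 (diffs.length : Int) 1) :
    (PySem.List.pyGet? diffs i).getD 0 ∈ diffs := by
  have h := (PySem.List.mem_pyRange_one).mp hi
  have hget := PySem.List.pyGet?_eq_some_getElem (xs := diffs) (i := i) h.1 (by exact_mod_cast h.2)
  rw [hget]
  simp

-- the candidate scan computes the first feasible level in [1, hi], else hi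
lemma candLoop_eq (diffs times : List Int) (limit hi : Int)
    (hne : diffs ≠ [])
    (hw : ∀ i ∈ PySem.List.pyRange 0 (diffs.length : Int) 1,
        1 < (PySem.List.pyGet? diffs i).getD 0 →
        0 ≤ (PySem.List.pyGet? times i).getD 0 +
            (if 0 < i then (PySem.List.pyGet? times (i - 1)).getD 0 else 0))
    (hhimem : hi ∈ diffs) (hhimax : ∀ y ∈ diffs, y ≤ hi) :
    ∀ cs (prev : Int),
      0 ≤ prev →
      (prev = 0 ∨ (1 ≤ prev ∧ canSolveWithLevel diffs times limit prev = false)) →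
      (∀ x ∈ diffs, 1 ≤ x → x ≤ prev ∨ x ∈ cs) →
      cs.Pairwise (· < ·) →
      (∀ x ∈ cs, prev < x ∧ 1 ≤ x ∧ x ≤ hi) →
      candLoop diffs times limit hi cs prev =
        ((PySem.List.pyRange 1 (hi + 1) 1).find?
          (fun k => canSolveWithLevel diffs times limit k)).getD hi := by
  intro cs
  induction cs with
  | nil =>
      intro prev hprev0 hprevinf hcover _ _
      simp only [candLoop]
      by_cases hhi1 : 1 ≤ hi
      · have hple : hi ≤ prev := by
          rcases hcover hi hhimem hhi1 with h | h
          · exact h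
          · simp at h
        have hprevinf' : canSolveWithLevel diffs times limit prev = false := by
          rcases hprevinf with h | h
          · omega
          · exact h.2
        rw [find?_pyRange_eq_none]
        · simp
        · intro l hl1 hl2
          cases hcl : canSolveWithLevel diffs times limit l with
          | false => rfl
          | true =>
              exact absurd (canSolve_mono diffs times limit hw (l1 := l) (l2 := prev) hl1 (by omega) hcl)
                (by simp [hprevinf'])
      · rw [PySem.List.pyRange_one_eq_nil (by omega)]
        simp
  | cons c rest ih =>
      intro prev hprev0 hprevinf hcover hpair hfacts
      obtain ⟨hprevc, hc1, hchi⟩ := hfacts c List.mem_cons_self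
      simp only [candLoop]
      by_cases hcanc : canSolveWithLevel diffs times limit c = true
      · rw [if_pos hcanc]
        set r := segLoop diffs times limit c (PySem.List.pyRange 0 (diffs.length : Int) 1) 0 0 0 (prev + 1) with hr
        have hreqle : prev + 1 ≤ r.2 := segLoop_req_le diffs times limit c _ 0 0 0 (prev + 1)
        -- the bridge, valid for every level in the open segment [prev+1, c-1]
        have hkey : ∀ l, prev + 1 ≤ l → l ≤ c - 1 →
            (canSolveWithLevel diffs times limit l = true ↔ (r.1 = true ∧ r.2 ≤ l)) := by
          intro l hl1 hl2
          have hl0 : 1 ≤ l := by omega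
          have hbridge := seg_main diffs times limit c l hl0
            (PySem.List.pyRange 0 (diffs.length : Int) 1) 0 0 0 (prev + 1)
            (by
              intro i hi
              constructor
              · intro hld
                set d := (PySem.List.pyGet? diffs i).getD 0 with hd
                have hdmem : d ∈ diffs := dval_mem diffs i hi
                have hd1 : 1 ≤ d := by omega
                rcases hcover d hdmem hd1 with h | h
                · omega
                · rcases List.mem_cons.mp h with h' | h'
                  · omega
                  · have := (List.pairwise_cons.mp hpair).1 _ h'
                    omega
              · intro hcd; omega)
            (by
              intro i hi hcd
              have hd2 : 1 < (PySem.List.pyGet? diffs i).getD 0 := by omega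
              exact hw i hi hd2)
            le_rfl (by omega)
            (by
              intro hemp
              exfalso
              have hlen : 0 < (diffs.length : Int) := by
                cases diffs with
                | nil => exact absurd rfl hne
                | cons a t => simp
              rw [PySem.List.pyRange_one_cons hlen] at hemp
              cases hemp)
          have h0 : (0 : Int) + 0 - l * 0 = 0 := by ring
          rw [h0] at hbridge
          exact hbridge
        -- levels at or below prev are infeasible
        have hlow : ∀ l, 1 ≤ l → l ≤ prev → canSolveWithLevel diffs times limit l = false := by
          intro l hl1 hl2
          rcases hprevinf with h | h
          · omega
          · cases hcl : canSolveWithLevel diffs times limit l with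
            | false => rfl
            | true =>
                exact absurd (canSolve_mono diffs times limit hw (l1 := l) (l2 := prev) hl1 hl2 hcl)
                  (by simp [h.2])
        by_cases hok : r.1 = true ∧ r.2 ≤ c - 1
        · rw [if_pos hok]
          rw [find?_pyRange_eq_some _ 1 (hi + 1) r.2 (by omega) (by omega)
            (by
              intro l hl1 hl2
              rcases le_or_gt l prev with h | h
              · exact hlow l hl1 h
              · have := hkey l (by omega) (by omega)
                cases hcl : canSolveWithLevel diffs times limit l with
                | false => rfl
                | true =>
                    have := this.mp hcl
                    omega)
            ((hkey r.2 hreqle hok.2).mpr ⟨hok.1, le_rfl⟩)]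
          simp
        · rw [if_neg hok]
          rw [find?_pyRange_eq_some _ 1 (hi + 1) c (by omega) (by omega)
            (by
              intro l hl1 hl2
              rcases le_or_gt l prev with h | h
              · exact hlow l hl1 h
              · have hk := hkey l (by omega) (by omega)
                cases hcl : canSolveWithLevel diffs times limit l with
                | false => rfl
                | true =>
                    obtain ⟨ho, hr2⟩ := hk.mp hcl
                    exact absurd ⟨ho, by omega⟩ hok)
            hcanc]
          simp
      · rw [if_neg hcanc]
        exact ih c (by omega)
          (Or.inr ⟨hc1, by simpa using hcanc⟩)
          (by
            intro x hx hx1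
            rcases hcover x hx hx1 with h | h
            · left; omega
            · rcases List.mem_cons.mp h with h' | h'
              · left; omega
              · right; exact h')
          (List.pairwise_cons.mp hpair).2
          (by
            intro x hx
            have := (List.pairwise_cons.mp hpair).1 _ hx
            have := hfacts x (List.mem_cons_of_mem c hx)
            exact ⟨by omega, this.2⟩)

-- ===== VERDICT (by name: the statement is the Claim_ definition above) =====
theorem solution_spec : Claim_equal_solution := by
  intro diffs times limit _ hpre
  obtain ⟨hne, hlen, hw⟩ := hpre
  unfold Spec_solution solution solution_alt
  simp only []
  -- hi = max(diffs): an element of diffs and an upper bound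
  obtain ⟨m, hm⟩ : ∃ m, PySem.List.max? diffs (fun x => x) = some m := by
    cases hmx : PySem.List.max? diffs (fun x => x) with
    | none => exact absurd ((PySem.List.max?_eq_none_iff _ _).mp hmx) hne
    | some m => exact ⟨m, rfl⟩
  rw [hm]
  simp only [Option.getD_some]
  have hmmem : m ∈ diffs := PySem.List.max?_mem hm
  have hmmax : ∀ y ∈ diffs, y ≤ m := by
    intro y hy
    exact PySem.List.max?_isMax hm y hy
  rw [bsLoop_eq_find diffs times limit hw _ 1 _ _ le_rfl rfl]
  set cands := PySem.List.sorted (PySem.Set.ofList (diffs.filter (fun d => decide (1 ≤ d)))) (fun x => x) false with hcands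
  have hcmem : ∀ x, x ∈ cands ↔ (x ∈ diffs ∧ 1 ≤ x) := by
    intro x
    rw [hcands, PySem.List.mem_sorted, PySem.Set.mem_ofList, List.mem_filter]
    simp
  exact (candLoop_eq diffs times limit m hne hw hmmem hmmax cands 0 le_rfl (Or.inl rfl)
    (fun x hx hx1 => Or.inr ((hcmem x).mpr ⟨hx, hx1⟩))
    (PySem.List.sorted_ofList_pairwise_lt _)
    (fun x hx => by
      have := (hcmem x).mp hx
      exact ⟨by omega, this.2, hmmax x this.1⟩)).symm
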